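-- pv_equiv track=rewrite | github.com/liyu10000/leetcode | string/#890.py | toPattern
-- ===== SOURCE A (Python) =====
-- def toPattern(word):
--     m = {}
--     curr = 0
--     for c in word:
--         if not c in m:
--             curr += 1
--             m[c] = curr
--     p = ''.join([chr(m[c]+96) for c in word])
--     return p
-- ===== SOURCE B (Python) =====
-- def toPattern(word):
--     # Rank of c = number of distinct characters strictly before c's first occurrence.
--     return ''.join(chr(97 + len(set(word[:word.index(c)]))) for c in word)
-- ===== Notes on version B (the rewrite author's own statement) =====
-- stated objective: alternative
-- what changed: Drops A's mutable dict-and-counter build entirely: B computes each character's rank directly as 1 + the number of distinct characters before its first occurrence (len(set(word[:word.index(c)]))), trading A's O(n) incremental table for a stateless per-character quadratic formula.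
import Mathlib
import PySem

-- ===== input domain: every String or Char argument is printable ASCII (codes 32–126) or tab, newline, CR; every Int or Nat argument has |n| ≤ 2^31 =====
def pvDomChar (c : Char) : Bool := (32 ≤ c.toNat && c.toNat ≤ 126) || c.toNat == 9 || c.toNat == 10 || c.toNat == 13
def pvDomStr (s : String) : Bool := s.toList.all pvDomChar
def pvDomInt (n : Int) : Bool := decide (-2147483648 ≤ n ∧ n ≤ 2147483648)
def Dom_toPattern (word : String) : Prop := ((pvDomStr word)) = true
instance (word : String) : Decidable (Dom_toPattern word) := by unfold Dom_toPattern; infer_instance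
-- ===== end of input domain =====

-- B drops A's incremental dict-and-counter build: each character's letter is computed
-- directly as 97 + number of distinct characters before its first occurrence; objective: alternative.

-- ===== PORT A =====
def stepA (st : PySem.Dict Char Int × Int) (c : Char) : PySem.Dict Char Int × Int :=
  if st.1.contains c then st else (st.1.insert c (st.2 + 1), st.2 + 1)

def toPattern (word : String) : String :=
  let st := word.toList.foldl stepA (PySem.Dict.empty, 0)
  String.mk (word.toList.map (fun c => Char.ofNat (st.1.getD c 0 + 96).toNat))

-- ===== PORT B =====
-- word.index(c): every c here is drawn from word, so index? is always some and the
-- .getD 0 default is never used (Python's ValueError is unreachable on these calls).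
def toPattern_alt (word : String) : String :=
  String.mk (word.toList.map (fun c =>
    Char.ofNat (97 +
      (PySem.Set.ofList (word.toList.take ((PySem.List.index? word.toList c).getD 0))).length)))

-- ===== PRECONDITION & SPEC =====
def Spec_toPattern (word : String) (out : String) : Prop := out = toPattern_alt word
instance (word : String) (out : String) : Decidable (Spec_toPattern word out) := by unfold Spec_toPattern; infer_instance

-- ===== CLAIM (what is proved, stated in full; the proofs are below) =====
def Claim_equal_toPattern : Prop := ∀ (word : String), Dom_toPattern word → Spec_toPattern word (toPattern word)

-- ===== LEMMAS AND PROOFS =====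

-- once a key is in A's dict, the rest of A's loop never changes its value
lemma preserveA (cs : List Char) : ∀ (d : PySem.Dict Char Int) (n : Int) (c : Char) (v : Int),
    d.get? c = some v → ((cs.foldl stepA (d, n)).1).get? c = some v := by
  induction cs with
  | nil => intro d n c v h; simpa using h
  | cons x t ih =>
      intro d n c v h
      simp only [List.foldl_cons, stepA]
      by_cases hx : d.contains x
      · simp only [hx, if_true]; exact ih d n c v h
      · simp only [hx]
        apply ih
        have hne : c ≠ x := by
          intro e; subst e
          rw [PySem.Dict.contains_eq_isSome_get?, h] at hx; simp at hx
        rw [PySem.Dict.get?_insert_of_ne _ _ hne]; exact h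

lemma contains_insert (d : PySem.Dict Char Int) (k : Char) (v : Int) (a : Char) :
    (d.insert k v).contains a = (d.contains a || a == k) := by
  simp [pysem]
  by_cases h : a = k <;> simp [h]

-- set(·) commutes with filtering the underlying list
lemma ofList_filter (l : List Char) (p : Char → Bool) :
    PySem.Set.ofList (l.filter p) = (PySem.Set.ofList l).filter p := by
  induction l with
  | nil => simp [PySem.Set.ofList_nil]
  | cons x t ih =>
      by_cases hx : p x
      · rw [List.filter_cons_of_pos hx, PySem.Set.ofList_cons, PySem.Set.ofList_cons,
            PySem.Set.discard, PySem.Set.discard, ih,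
            List.filter_cons_of_pos hx, List.filter_filter, List.filter_filter]
        congr 1
        apply List.filter_congr
        intro a _
        rw [Bool.and_comm]
      · rw [List.filter_cons_of_neg hx, ih, PySem.Set.ofList_cons, PySem.Set.discard,
            List.filter_cons_of_neg hx, List.filter_filter]
        apply List.filter_congr
        intro a _
        by_cases ha : a = x
        · subst ha; simp [hx]
        · simp [ha]

-- main invariant: after A's loop, a fresh key c ∈ cs gets n + 1 + (number of distinct
-- characters, not already in d, appearing before c's first occurrence in cs)
lemma mainA (cs : List Char) : ∀ (d : PySem.Dict Char Int) (n : Int) (c : Char),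
    c ∈ cs → d.contains c = false →
    ((cs.foldl stepA (d, n)).1).get? c
      = some (n + 1 + ((PySem.Set.ofList ((cs.take ((PySem.List.index? cs c).getD 0)).filter
          (fun a => !(d.contains a)))).length : Int)) := by
  induction cs with
  | nil => intro d n c hc; simp at hc
  | cons x t ih =>
      intro d n c hc hdc
      by_cases hcx : c = x
      · subst hcx
        rw [PySem.List.index?_cons_self]
        simp only [Option.getD_some, List.take_zero, List.filter_nil, PySem.Set.ofList_nil,
          List.length_nil, List.foldl_cons, stepA, hdc, Bool.false_eq_true, if_false]
        have := preserveA t (d.insert c (n + 1)) (n + 1) c (n + 1)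
          (PySem.Dict.get?_insert_self _ _ _)
        rw [this]
        norm_num
      · have hct : c ∈ t := by
          rcases List.mem_cons.mp hc with h | h
          · exact absurd h hcx
          · exact h
        obtain ⟨k, hk⟩ : ∃ k, PySem.List.index? t c = some k := by
          have := (PySem.List.index?_isSome_iff t c).mpr hct
          cases h : PySem.List.index? t c with
          | none => rw [h] at this; simp at this
          | some k => exact ⟨k, rfl⟩
        have hidx : (PySem.List.index? (x :: t) c).getD 0 = k + 1 := by
          rw [PySem.List.index?_cons_of_ne t (Ne.symm hcx), hk]; rfl
        rw [hidx]
        have htake : (x :: t).take (k + 1) = x :: t.take k := rfl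
        rw [htake]
        simp only [List.foldl_cons, stepA]
        by_cases hx : d.contains x
        · -- x already known: dict and counter unchanged, x filtered out of the count
          simp only [hx, if_true, List.filter_cons, Bool.not_true, Bool.false_eq_true, if_false]
          have := ih d n c hct hdc
          rw [hk] at this
          simpa using this
        · -- fresh x: both the counter and the distinct-prefix count grow by one
          simp only [hx, Bool.false_eq_true, if_false]
          have hdc' : (d.insert x (n + 1)).contains c = false := by
            rw [contains_insert, hdc]
            simp [hcx]
          have := ih (d.insert x (n + 1)) (n + 1) c hct hdc'
          rw [hk] at this
          simp only [Option.getD_some] at this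
          rw [this]
          congr 1
          have hfe : (t.take k).filter (fun a => !((d.insert x (n + 1)).contains a))
              = ((t.take k).filter (fun a => !(d.contains a))).filter (fun a => !(a == x)) := by
            rw [List.filter_filter]
            apply List.filter_congr
            intro a _
            rw [contains_insert]
            cases d.contains a <;> cases h : (a == x) <;> simp
          rw [hfe, ofList_filter, List.filter_cons_of_pos (by simp [hx]),
              PySem.Set.ofList_cons, PySem.Set.discard]
          simp only [List.length_cons]
          push_cast
          ring
  
-- ===== VERDICT (by name: the statement is the Claim_ definition above) =====
theorem toPattern_spec : Claim_equal_toPattern := by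
  intro word _
  unfold Spec_toPattern toPattern toPattern_alt
  show String.mk (word.toList.map (fun c =>
      Char.ofNat (((word.toList.foldl stepA (PySem.Dict.empty, 0)).1.getD c 0 + 96)).toNat)) = _
  congr 1
  apply List.map_congr_left
  intro c hc
  have h := mainA word.toList PySem.Dict.empty 0 c hc (PySem.Dict.contains_empty c)
  have hfilt : ∀ l : List Char,
      l.filter (fun a => !((PySem.Dict.empty : PySem.Dict Char Int).contains a)) = l := by
    intro l; simp [PySem.Dict.contains_empty]
  rw [hfilt] at h
  rw [PySem.Dict.getD_of_get?_eq_some _ 0 h]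
  congr 1
  omega
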